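-- pv_equiv track=rewrite | github.com/StergiosKo/RL-Taxi-Agent | train_taxi_agent_RL.py | unpack_grid
-- ===== SOURCE A (Python) =====
-- def unpack_grid(grid_string, num_rows, num_columns):
--     grid = []
--     for i in range(num_columns):
--         start = i * num_rows
--         end = start + num_rows
--         col_string = grid_string[start:end]
--         col = list(col_string)
--         grid.append(col)
--     return grid
-- ===== SOURCE B (Python) =====
-- def unpack_grid(grid_string, num_rows, num_columns):
--     cols = num_columns if num_columns > 0 else 0
--     rows = num_rows if num_rows > 0 else 0
--     grid = [[] for _ in range(cols)]
--     for idx, ch in enumerate(grid_string[:cols * rows]):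
--         grid[idx // rows].append(ch)
--     return grid
-- ===== Notes on version B (the rewrite author's own statement) =====
-- stated objective: alternative
-- what changed: B pre-creates the list of columns and scatters each character of the (truncated) string into its column in one enumerate pass with idx//num_rows, instead of slicing num_columns contiguous blocks.
-- intended difference: For num_rows < 0 with num_columns >= 1 and len(grid_string) >= 1 - num_rows, A's negative-index slice wraparound puts grid_string[0:num_rows] into column 0 (e.g. A('ab',-1,1)=[['a']]), while B returns all-empty columns, the intended value for a non-positive row count. — e.g. on unpack_grid("ab", -1, 1): A returns [["a"]], B returns [[]]
import Mathlib
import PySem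

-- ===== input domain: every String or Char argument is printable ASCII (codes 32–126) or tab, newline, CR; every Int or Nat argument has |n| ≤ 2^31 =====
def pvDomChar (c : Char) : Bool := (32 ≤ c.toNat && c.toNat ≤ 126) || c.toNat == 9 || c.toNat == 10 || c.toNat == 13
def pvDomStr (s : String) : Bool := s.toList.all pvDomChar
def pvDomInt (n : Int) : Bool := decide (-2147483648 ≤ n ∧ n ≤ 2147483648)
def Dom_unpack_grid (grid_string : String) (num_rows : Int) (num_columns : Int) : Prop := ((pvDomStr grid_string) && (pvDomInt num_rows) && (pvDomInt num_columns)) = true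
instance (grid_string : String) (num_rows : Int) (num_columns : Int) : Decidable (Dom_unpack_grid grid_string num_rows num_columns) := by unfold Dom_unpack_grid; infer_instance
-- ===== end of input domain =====

-- B scatters each character into its column in one enumerate pass (idx // num_rows) over the
-- truncated string instead of slicing num_columns contiguous blocks; for num_rows < 0 B returns
-- empty columns while A's negative slice wraparound fills column 0 (stated as D_unpack_grid).


-- ===== PORT A =====
def unpack_grid (grid_string : String) (num_rows : Int) (num_columns : Int) : List (List String) :=
  (PySem.List.pyRange 0 num_columns 1).foldl
    (fun grid i =>
      let start := i * num_rows
      let «end» := start + num_rows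
      let col_string := PySem.List.slice grid_string.toList (some start) (some «end»)
      let col := col_string.map (fun ch => String.mk [ch])
      grid ++ [col])
    []

-- ===== PORT B =====
def unpack_grid_alt (grid_string : String) (num_rows : Int) (num_columns : Int) : List (List String) :=
  let cols : Int := if num_columns > 0 then num_columns else 0
  let rows : Int := if num_rows > 0 then num_rows else 0
  let grid : List (List String) := List.replicate cols.toNat []
  (PySem.List.enumerate (PySem.List.slice grid_string.toList none (some (cols * rows))) 0).foldl
    (fun grid p =>
      grid.modify (PySem.Int.floordiv p.1 rows).toNat (fun col => col ++ [String.mk [p.2]]))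
    grid

-- ===== PRECONDITION & SPEC =====
-- For num_rows < 0 with num_columns ≥ 1 and len(grid_string) ≥ 1 - num_rows, A's negative-index
-- slice wraparound returns grid_string[0:num_rows] as column 0, while B returns all-empty
-- columns — the intended value for a non-positive row count.
def D_unpack_grid (grid_string : String) (num_rows : Int) (num_columns : Int) : Prop :=
  num_rows < 0 ∧ 1 ≤ num_columns ∧ 1 - num_rows ≤ (grid_string.toList.length : Int)
instance (grid_string : String) (num_rows : Int) (num_columns : Int) : Decidable (D_unpack_grid grid_string num_rows num_columns) := by unfold D_unpack_grid; infer_instance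
def Spec_unpack_grid (grid_string : String) (num_rows : Int) (num_columns : Int) (out : List (List String)) : Prop := ¬ D_unpack_grid grid_string num_rows num_columns → out = unpack_grid_alt grid_string num_rows num_columns
instance (grid_string : String) (num_rows : Int) (num_columns : Int) (out : List (List String)) : Decidable (Spec_unpack_grid grid_string num_rows num_columns out) := by unfold Spec_unpack_grid; infer_instance
def pvDiffWitness_unpack_grid : String × Int × Int := ("ab", -1, 1)
def pvDiffWitnessOut_unpack_grid : (List (List String)) × (List (List String)) := ([["a"]], [[]])

-- ===== CLAIM (what is proved, stated in full; the proofs are below) =====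
def Claim_unchanged_unpack_grid : Prop := ∀ (grid_string : String) (num_rows : Int) (num_columns : Int), Dom_unpack_grid grid_string num_rows num_columns → Spec_unpack_grid grid_string num_rows num_columns (unpack_grid grid_string num_rows num_columns)
def Claim_changed_unpack_grid : Prop := Dom_unpack_grid (pvDiffWitness_unpack_grid.1) (pvDiffWitness_unpack_grid.2.1) (pvDiffWitness_unpack_grid.2.2) ∧ D_unpack_grid (pvDiffWitness_unpack_grid.1) (pvDiffWitness_unpack_grid.2.1) (pvDiffWitness_unpack_grid.2.2) ∧ unpack_grid (pvDiffWitness_unpack_grid.1) (pvDiffWitness_unpack_grid.2.1) (pvDiffWitness_unpack_grid.2.2) = pvDiffWitnessOut_unpack_grid.1 ∧ unpack_grid_alt (pvDiffWitness_unpack_grid.1) (pvDiffWitness_unpack_grid.2.1) (pvDiffWitness_unpack_grid.2.2) = pvDiffWitnessOut_unpack_grid.2 ∧ pvDiffWitnessOut_unpack_grid.1 ≠ pvDiffWitnessOut_unpack_grid.2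
def Claim_exact_unpack_grid : Prop := ∀ (grid_string : String) (num_rows : Int) (num_columns : Int), Dom_unpack_grid grid_string num_rows num_columns → D_unpack_grid grid_string num_rows num_columns → unpack_grid grid_string num_rows num_columns ≠ unpack_grid_alt grid_string num_rows num_columns

-- ===== LEMMAS AND PROOFS =====

-- target shape shared by both ports in the num_rows ≥ 0 case: column k of the character source
def pvChunks (R C : Nat) (x : List Char) : List (List String) :=
  (List.range C).map (fun k => ((x.drop (k * R)).take R).map (fun ch => String.mk [ch]))

lemma pvSliceEmpty {α : Type} (xs : List α) (a b : Int)
    (h : PySem.List.clampIdx xs.length b ≤ PySem.List.clampIdx xs.length a) :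
    PySem.List.slice xs (some a) (some b) = [] := by
  have := PySem.List.length_slice xs a b
  have hl : (PySem.List.slice xs (some a) (some b)).length = 0 := by omega
  exact List.eq_nil_of_length_eq_zero hl

lemma pvChunks_step (R C : Nat) (hR : 0 < R) (pref : List Char) (ch : Char)
    (hp : pref.length < C * R) :
    (pvChunks R C pref).modify (pref.length / R) (fun col => col ++ [String.mk [ch]])
      = pvChunks R C (pref ++ [ch]) := by
  have hdm := Nat.div_add_mod pref.length R
  have hmlt := Nat.mod_lt pref.length hR
  have hc1 : (pref.length / R) * R = R * (pref.length / R) := Nat.mul_comm _ _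
  have hjC : pref.length / R < C := by
    rcases Nat.lt_or_ge (pref.length / R) C with h | h
    · exact h
    · exfalso; have := Nat.mul_le_mul_right R h; omega
  apply List.ext_getElem
  · simp [pvChunks, List.length_modify]
  · intro k h1 h2
    simp only [pvChunks, List.length_modify, List.length_map, List.length_range] at h1 h2
    rw [List.getElem_modify]
    simp only [pvChunks, List.getElem_map, List.getElem_range]
    by_cases hk : pref.length / R = k
    · subst hk
      have hle : (pref.length / R) * R ≤ pref.length := by omega
      have hlen1 : (pref.drop ((pref.length / R) * R)).length = pref.length - (pref.length / R) * R := by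
        simp
      rw [List.drop_append_of_le_length hle, if_pos rfl]
      have hlt : pref.length - (pref.length / R) * R < R := by omega
      rw [List.take_of_length_le (by omega), List.take_of_length_le (by simp; omega)]
      simp
    · rw [if_neg hk]
      rcases Nat.lt_or_ge k (pref.length / R) with hlt | hge
      · have hkk : k * R + R ≤ (pref.length / R) * R := by
          have := Nat.mul_le_mul_right R hlt
          rw [Nat.succ_mul] at this; exact this
        have hfull : R ≤ (pref.drop (k * R)).length := by simp; omega
        have hkle : k * R ≤ pref.length := by omega
        rw [List.drop_append_of_le_length hkle, List.take_append_of_le_length hfull]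
      · have hgt : pref.length / R < k := lt_of_le_of_ne hge (fun h => hk h)
        have : pref.length + 1 ≤ k * R := by
          have h2 := Nat.mul_le_mul_right R hgt
          rw [Nat.succ_mul] at h2; omega
        rw [List.drop_eq_nil_of_le (by omega), List.drop_eq_nil_of_le (by simp; omega)]

lemma pvScatter_aux (R C : Nat) (hR : 0 < R) (suf : List Char) : ∀ (pref : List Char),
    pref.length + suf.length ≤ C * R →
    (PySem.List.enumerate suf (pref.length : Int)).foldl
      (fun g p => g.modify (PySem.Int.floordiv p.1 (R : Int)).toNat
        (fun col => col ++ [String.mk [p.2]])) (pvChunks R C pref)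
      = pvChunks R C (pref ++ suf) := by
  induction suf with
  | nil => intro pref _; simp [PySem.List.enumerate]
  | cons ch rest ih =>
    intro pref hlen
    rw [PySem.List.enumerate_cons, List.foldl_cons]
    have hfd : (PySem.Int.floordiv ((pref.length : Nat) : Int) ((R : Nat) : Int)).toNat
        = pref.length / R := by
      rw [PySem.Int.floordiv_natCast]; exact Int.toNat_natCast _
    rw [hfd, pvChunks_step R C hR pref ch (by simp at hlen; omega)]
    have hcast : ((pref.length : Int) + 1) = (((pref ++ [ch]).length : Nat) : Int) := by
      simp
    rw [hcast, ih (pref ++ [ch]) (by simp at hlen ⊢; omega)]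
    simp

-- A's fold as a map of slices
lemma pvA_eq (s : String) (r c : Int) :
    unpack_grid s r c = (PySem.List.pyRange 0 c 1).map
      (fun i => (PySem.List.slice s.toList (some (i * r)) (some (i * r + r))).map
        (fun ch => String.mk [ch])) := by
  unfold unpack_grid
  rw [PySem.List.foldl_append_singleton_eq_map]
  simp

lemma pvMain (s : String) (r c : Int) (hr : 0 ≤ r) (hc : 0 < c) :
    unpack_grid s r c = unpack_grid_alt s r c := by
  rcases Int.eq_ofNat_of_zero_le hr with ⟨R, rfl⟩
  rcases Int.eq_ofNat_of_zero_le (le_of_lt hc) with ⟨C, rfl⟩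
  have hC : 0 < C := by exact_mod_cast hc
  -- A side
  rw [pvA_eq, PySem.List.pyRange_one]
  simp only [Int.sub_zero, Int.toNat_natCast, List.map_map]
  have hA : (List.range C).map ((fun i => (PySem.List.slice s.toList (some (i * (R:Int)))
        (some (i * (R:Int) + (R:Int)))).map (fun ch => String.mk [ch])) ∘ (fun k : Nat => (0:Int) + k))
      = pvChunks R C s.toList := by
    apply List.map_congr_left
    intro k _
    simp only [Function.comp, Int.zero_add]
    have : ((k : Int)) * (R : Int) = ((k * R : Nat) : Int) := by push_cast; ring
    rw [this, PySem.List.slice_natCast_add]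
  rw [hA]
  -- B side
  unfold unpack_grid_alt
  simp only [hc, if_pos]
  have hrepl : pvChunks R C ([] : List Char) = List.replicate C ([] : List String) := by
    simp [pvChunks]
  by_cases hRz : R = 0
  · subst hRz
    simp only [Int.natCast_zero]
    rw [if_neg (by omega : ¬ ((0:Int) > 0))]
    simp only [Int.mul_zero]
    rw [show ((0:Int)) = ((0:Nat):Int) by simp, PySem.List.slice_to_natCast]
    simp only [List.take_zero, PySem.List.enumerate, List.foldl_nil, Int.toNat_natCast]
    rw [← hrepl]
    simp [pvChunks]
  · have hRn : 0 < R := Nat.pos_of_ne_zero hRz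
    have hRpos : ((0:Int) < (R : Int)) := by exact_mod_cast hRn
    rw [if_pos hRpos]
    have hprod : ((C:Int)) * (R:Int) = ((C * R : Nat) : Int) := by push_cast; ring
    rw [hprod, PySem.List.slice_to_natCast]
    have hsc := pvScatter_aux R C hRn (s.toList.take (C * R)) [] (by simp)
    simp only [List.nil_append, List.length_nil, Int.natCast_zero, hrepl] at hsc
    simp only [Int.toNat_natCast]
    rw [hsc]
    apply List.map_congr_left
    intro k hk
    simp only [List.mem_range] at hk
    rw [List.drop_take, List.take_take]
    have : min R (C * R - k * R) = R := by
      have h2 := Nat.mul_le_mul_right R hk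
      rw [Nat.succ_mul] at h2; omega
    rw [this]

lemma pvZeroCols (s : String) (r c : Int) (hc : c ≤ 0) :
    unpack_grid s r c = [] ∧ unpack_grid_alt s r c = [] := by
  constructor
  · rw [pvA_eq, PySem.List.pyRange_one]
    have : (c - 0).toNat = 0 := by omega
    rw [this]; simp
  · unfold unpack_grid_alt
    have h0 : ¬ (c > 0) := by omega
    rw [if_neg h0]
    simp only [Int.zero_mul]
    rw [show ((0:Int)) = ((0:Nat):Int) by simp, PySem.List.slice_to_natCast]
    simp

lemma pvNegRows (s : String) (r c : Int) (hr : r < 0) (hc : 0 < c)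
    (hshort : (s.toList.length : Int) ≤ -r) :
    unpack_grid s r c = unpack_grid_alt s r c := by
  have hL : (s.toList.length : Int) + r ≤ 0 := by omega
  -- A: every slice is empty
  rw [pvA_eq]
  have hA : ∀ i ∈ PySem.List.pyRange 0 c 1,
      PySem.List.slice s.toList (some (i * r)) (some (i * r + r)) = ([] : List Char) := by
    intro i hi
    rw [PySem.List.mem_pyRange_one] at hi
    have hir : i * r ≤ 0 := mul_nonpos_of_nonneg_of_nonpos hi.1 (le_of_lt hr)
    apply pvSliceEmpty
    simp only [PySem.List.clampIdx]
    split_ifs with h1 h2 h3 h4 h5 h6 <;> omega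
  rw [List.map_congr_left (fun i hi => by rw [hA i hi])]
  -- B: cols ≥ 1 of empties, rows = 0, truncated string empty
  unfold unpack_grid_alt
  rw [if_pos hc, if_neg (by omega : ¬ (r > 0))]
  simp only [Int.mul_zero]
  rw [show ((0:Int)) = ((0:Nat):Int) by simp, PySem.List.slice_to_natCast]
  simp only [List.take_zero, PySem.List.enumerate, List.foldl_nil]
  rw [PySem.List.pyRange_one]
  simp [Function.comp_def, List.map_const']

-- ===== VERDICT (by name: the statement is the Claim_ definition above) =====
theorem unpack_grid_spec : Claim_unchanged_unpack_grid := by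
  intro s r c _ hnd
  by_cases hc : c ≤ 0
  · obtain ⟨h1, h2⟩ := pvZeroCols s r c hc
    rw [h1, h2]
  · have hc' : (0:Int) < c := by omega
    by_cases hr : 0 ≤ r
    · exact pvMain s r c hr hc'
    · apply pvNegRows s r c (by omega) hc'
      unfold D_unpack_grid at hnd
      have h3 : ¬ (1 - r ≤ (s.toList.length : Int)) :=
        fun h => hnd ⟨by omega, by omega, h⟩
      omega

theorem unpack_grid_changed : Claim_changed_unpack_grid := by
  unfold Claim_changed_unpack_grid; decide

theorem unpack_grid_tight : Claim_exact_unpack_grid := by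
  intro s r c _ hd heq
  obtain ⟨hr, hc, hL⟩ := hd
  have hA0 : (unpack_grid s r c)[0]? = some ((PySem.List.slice s.toList (some ((0:Int) * r))
      (some ((0:Int) * r + r))).map (fun ch => String.mk [ch])) := by
    rw [pvA_eq, PySem.List.pyRange_one_cons (by omega : (0:Int) < c)]
    simp only [List.map_cons, List.getElem?_cons_zero]
  have hB : unpack_grid_alt s r c = List.replicate c.toNat [] := by
    unfold unpack_grid_alt
    rw [if_pos (by omega : c > 0), if_neg (by omega : ¬ (r > 0))]
    simp only [Int.mul_zero]
    rw [show ((0:Int)) = ((0:Nat):Int) by simp, PySem.List.slice_to_natCast]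
    simp
  have hlen0 : 1 ≤ (PySem.List.slice s.toList (some ((0:Int) * r))
      (some ((0:Int) * r + r))).length := by
    rw [PySem.List.length_slice]
    simp only [PySem.List.clampIdx, Int.zero_mul, Int.zero_add]
    split_ifs <;> omega
  rw [heq, hB] at hA0
  rw [List.getElem?_replicate, if_pos (by omega : 0 < c.toNat)] at hA0
  have := congrArg (fun o => (o.getD []).length) hA0
  simp only [Option.getD_some, List.length_map, List.length_nil] at this
  omega
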